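-- pv_equiv track=rewrite | github.com/MoiseTripon/ml-timemaster | src/grid_builder.py | _adjust_for_conflicts
-- ===== SOURCE A (Python) =====
-- from typing import List, Dict, Tuple, Optional, Set
--
-- def _adjust_for_conflicts(row_idx: int, col_idx: int,
--                            rowspan: int, colspan: int,
--                            covered: Set[Tuple[int, int]],
--                            num_rows: int, num_cols: int) -> Tuple[int, int]:
--     """Adjust spans to avoid conflicts with already placed cells."""
--     # First check if original spans work
--     has_conflict = False
--     for r in range(row_idx, min(row_idx + rowspan, num_rows)):
--         for c in range(col_idx, min(col_idx + colspan, num_cols)):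
--             if (r, c) in covered:
--                 has_conflict = True
--                 break
--         if has_conflict:
--             break
--
--     if not has_conflict:
--         return rowspan, colspan
--
--     # Try to find the best non-conflicting spans
--     # Strategy: try reducing colspan first, then rowspan
--     new_colspan = colspan
--     while new_colspan > 1:
--         conflict = False
--         for r in range(row_idx, min(row_idx + rowspan, num_rows)):
--             for c in range(col_idx, min(col_idx + new_colspan, num_cols)):
--                 if (r, c) in covered:
--                     conflict = True
--                     break
--             if conflict:
--                 break
--         if not conflict:
--             break
--         new_colspan -= 1
--
--     new_rowspan = rowspan
--     while new_rowspan > 1: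
--         conflict = False
--         for r in range(row_idx, min(row_idx + new_rowspan, num_rows)):
--             for c in range(col_idx, min(col_idx + new_colspan, num_cols)):
--                 if (r, c) in covered:
--                     conflict = True
--                     break
--             if conflict:
--                 break
--         if not conflict:
--             break
--         new_rowspan -= 1
--
--     return max(1, new_rowspan), max(1, new_colspan)
-- ===== SOURCE B (Python) =====
-- def _min_off(covered, r_lo, r_hi, c_lo, c_hi, use_row):
--     """Minimal row (or column) offset of any covered cell inside the half-open box."""
--     best = None
--     for (r, c) in covered:
--         if r_lo <= r < r_hi and c_lo <= c < c_hi: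
--             off = (r - r_lo) if use_row else (c - c_lo)
--             if best is None or off < best:
--                 best = off
--     return best
--
--
-- def _adjust_for_conflicts(row_idx, col_idx, rowspan, colspan, covered, num_rows, num_cols):
--     """Adjust spans to avoid conflicts with already placed cells.
--
--     Single scan per axis: because a conflict is monotone as the rectangle grows,
--     the largest safe colspan is the minimal column offset of a conflicting cell
--     (and likewise for rows), so no repeated rectangle rescans are needed."""
--     row_end = min(row_idx + rowspan, num_rows)
--     cmin = _min_off(covered, row_idx, row_end, col_idx, num_cols, False)
--     if cmin is None or cmin >= colspan:
--         return rowspan, colspan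
--     new_colspan = max(1, cmin)
--     col_end = min(col_idx + new_colspan, num_cols)
--     rmin = _min_off(covered, row_idx, num_rows, col_idx, col_end, True)
--     if rmin is None or rmin >= rowspan:
--         return rowspan, new_colspan
--     return max(1, min(rowspan, rmin)), new_colspan
-- ===== Notes on version B (the rewrite author's own statement) =====
-- stated objective: alternative
-- what changed: Instead of rescanning the whole rectangle while decrementing colspan and then rowspan, B makes one pass over covered per axis computing the minimal conflicting column/row offset, which by monotonicity of conflict directly yields the shrunk spans.
import Mathlib
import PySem

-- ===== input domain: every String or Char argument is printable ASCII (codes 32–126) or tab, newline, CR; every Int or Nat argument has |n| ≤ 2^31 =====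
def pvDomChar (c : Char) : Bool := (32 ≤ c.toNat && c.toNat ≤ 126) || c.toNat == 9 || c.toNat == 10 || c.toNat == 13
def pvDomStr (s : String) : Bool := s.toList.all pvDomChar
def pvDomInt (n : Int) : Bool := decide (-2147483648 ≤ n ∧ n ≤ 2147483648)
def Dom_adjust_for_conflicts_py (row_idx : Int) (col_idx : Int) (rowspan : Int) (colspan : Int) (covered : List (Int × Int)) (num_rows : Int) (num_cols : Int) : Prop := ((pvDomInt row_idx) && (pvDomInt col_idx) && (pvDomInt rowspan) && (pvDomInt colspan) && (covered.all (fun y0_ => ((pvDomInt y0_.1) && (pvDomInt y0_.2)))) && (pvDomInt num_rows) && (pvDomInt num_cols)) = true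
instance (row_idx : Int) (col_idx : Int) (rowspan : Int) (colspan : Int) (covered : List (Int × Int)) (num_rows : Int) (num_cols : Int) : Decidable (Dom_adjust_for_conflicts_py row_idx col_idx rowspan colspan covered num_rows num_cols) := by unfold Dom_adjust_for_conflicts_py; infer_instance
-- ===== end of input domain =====

-- B replaces A's per-candidate-span rectangle rescans by one pass over `covered` per axis
-- computing the minimal conflicting column/row offset (objective: alternative algorithm).

-- ===== PORT A =====
-- A's nested for-loops with a flag and double break = short-circuit existential scan
def pvAconf (row_idx : Int) (col_idx : Int) (rs : Int) (cs : Int) (covered : List (Int × Int)) (num_rows : Int) (num_cols : Int) : Bool :=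
  (PySem.List.pyRange row_idx (min (row_idx + rs) num_rows) 1).any (fun r =>
    (PySem.List.pyRange col_idx (min (col_idx + cs) num_cols) 1).any (fun c =>
      covered.contains (r, c)))

-- `while new_colspan > 1: … if not conflict: break; new_colspan -= 1`
def pvAshrinkCol (row_idx : Int) (col_idx : Int) (rowspan : Int) (covered : List (Int × Int)) (num_rows : Int) (num_cols : Int) (cs : Int) : Int :=
  if _h : cs > 1 then
    if pvAconf row_idx col_idx rowspan cs covered num_rows num_cols then
      pvAshrinkCol row_idx col_idx rowspan covered num_rows num_cols (cs - 1)
    else cs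
  else cs
termination_by cs.toNat
decreasing_by omega

-- `while new_rowspan > 1: … if not conflict: break; new_rowspan -= 1`
def pvAshrinkRow (row_idx : Int) (col_idx : Int) (new_colspan : Int) (covered : List (Int × Int)) (num_rows : Int) (num_cols : Int) (rs : Int) : Int :=
  if _h : rs > 1 then
    if pvAconf row_idx col_idx rs new_colspan covered num_rows num_cols then
      pvAshrinkRow row_idx col_idx new_colspan covered num_rows num_cols (rs - 1)
    else rs
  else rs
termination_by rs.toNat
decreasing_by omega

def adjust_for_conflicts_py (row_idx : Int) (col_idx : Int) (rowspan : Int) (colspan : Int) (covered : List (Int × Int)) (num_rows : Int) (num_cols : Int) : Int × Int :=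
  if ¬ (pvAconf row_idx col_idx rowspan colspan covered num_rows num_cols) then
    (rowspan, colspan)
  else
    let new_colspan := pvAshrinkCol row_idx col_idx rowspan covered num_rows num_cols colspan
    let new_rowspan := pvAshrinkRow row_idx col_idx new_colspan covered num_rows num_cols rowspan
    (max 1 new_rowspan, max 1 new_colspan)

-- ===== PORT B =====
-- B's helper _min_off: one fold over covered keeping the minimal offset inside the box
def pvMinOff (covered : List (Int × Int)) (r_lo : Int) (r_hi : Int) (c_lo : Int) (c_hi : Int) (use_row : Bool) : Option Int :=
  covered.foldl (fun best rc =>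
    if r_lo ≤ rc.1 ∧ rc.1 < r_hi ∧ c_lo ≤ rc.2 ∧ rc.2 < c_hi then
      match best with
      | none => some (if use_row then rc.1 - r_lo else rc.2 - c_lo)
      | some m => if (if use_row then rc.1 - r_lo else rc.2 - c_lo) < m
                  then some (if use_row then rc.1 - r_lo else rc.2 - c_lo) else some m
    else best) none

def adjust_for_conflicts_py_alt (row_idx : Int) (col_idx : Int) (rowspan : Int) (colspan : Int) (covered : List (Int × Int)) (num_rows : Int) (num_cols : Int) : Int × Int :=
  match pvMinOff covered row_idx (min (row_idx + rowspan) num_rows) col_idx num_cols false with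
  | none => (rowspan, colspan)
  | some cmin =>
    if cmin ≥ colspan then (rowspan, colspan)
    else
      match pvMinOff covered row_idx num_rows col_idx (min (col_idx + max 1 cmin) num_cols) true with
      | none => (rowspan, max 1 cmin)
      | some rmin =>
        if rmin ≥ rowspan then (rowspan, max 1 cmin)
        else (max 1 (min rowspan rmin), max 1 cmin)

-- ===== PRECONDITION & SPEC =====
def Spec_adjust_for_conflicts_py (row_idx : Int) (col_idx : Int) (rowspan : Int) (colspan : Int) (covered : List (Int × Int)) (num_rows : Int) (num_cols : Int) (out : Int × Int) : Prop := out = adjust_for_conflicts_py_alt row_idx col_idx rowspan colspan covered num_rows num_cols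
instance (row_idx : Int) (col_idx : Int) (rowspan : Int) (colspan : Int) (covered : List (Int × Int)) (num_rows : Int) (num_cols : Int) (out : Int × Int) : Decidable (Spec_adjust_for_conflicts_py row_idx col_idx rowspan colspan covered num_rows num_cols out) := by unfold Spec_adjust_for_conflicts_py; infer_instance

-- ===== CLAIM (what is proved, stated in full; the proofs are below) =====
def Claim_equal_adjust_for_conflicts_py : Prop := ∀ (row_idx : Int) (col_idx : Int) (rowspan : Int) (colspan : Int) (covered : List (Int × Int)) (num_rows : Int) (num_cols : Int), Dom_adjust_for_conflicts_py row_idx col_idx rowspan colspan covered num_rows num_cols → Spec_adjust_for_conflicts_py row_idx col_idx rowspan colspan covered num_rows num_cols (adjust_for_conflicts_py row_idx col_idx rowspan colspan covered num_rows num_cols)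

-- ===== LEMMAS AND PROOFS =====

theorem foldl_minstep (p : Int × Int → Prop) [DecidablePred p] (f : Int × Int → Int) :
    ∀ (l : List (Int × Int)) (acc : Option Int),
    l.foldl (fun best rc =>
      if p rc then
        match best with
        | none => some (f rc)
        | some m => if f rc < m then some (f rc) else some m
      else best) acc
    = (acc.elim [] (fun m => [m]) ++ (l.filter (fun rc => decide (p rc))).map f).min? := by
  intro l
  induction l with
  | nil => intro acc; cases acc <;> simp [List.min?]
  | cons rc l ih =>
    intro acc
    by_cases h : p rc
    · cases acc with
      | none =>
        simp only [List.foldl_cons, if_pos h, ih]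
        simp [h, List.min?]
      | some m =>
        have hstep : (if f rc < m then some (f rc) else some m) = some (min m (f rc)) := by
          split_ifs <;> simp [min_def] <;> omega
        simp only [List.foldl_cons, if_pos h, hstep, ih]
        simp [h, List.min?]
    · cases acc with
      | none =>
        simp only [List.foldl_cons, if_neg h, ih]
        simp [h]
      | some m =>
        simp only [List.foldl_cons, if_neg h, ih]
        simp [h]

theorem pvMinOff_eq_min? (covered : List (Int × Int)) (r_lo r_hi c_lo c_hi : Int) (use_row : Bool) :
    pvMinOff covered r_lo r_hi c_lo c_hi use_row =
      ((covered.filter (fun rc => decide (r_lo ≤ rc.1 ∧ rc.1 < r_hi ∧ c_lo ≤ rc.2 ∧ rc.2 < c_hi))).map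
        (fun rc => if use_row then rc.1 - r_lo else rc.2 - c_lo)).min? := by
  have h := foldl_minstep (fun rc => r_lo ≤ rc.1 ∧ rc.1 < r_hi ∧ c_lo ≤ rc.2 ∧ rc.2 < c_hi)
      (fun rc => if use_row then rc.1 - r_lo else rc.2 - c_lo) covered none
  simpa [pvMinOff] using h

theorem pvMinOff_none_iff (covered : List (Int × Int)) (r_lo r_hi c_lo c_hi : Int) (use_row : Bool) :
    pvMinOff covered r_lo r_hi c_lo c_hi use_row = none ↔
      ∀ rc ∈ covered, ¬(r_lo ≤ rc.1 ∧ rc.1 < r_hi ∧ c_lo ≤ rc.2 ∧ rc.2 < c_hi) := by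
  rw [pvMinOff_eq_min?, List.min?_eq_none_iff, List.map_eq_nil_iff, List.filter_eq_nil_iff]
  simp

theorem pvMinOff_some_iff (covered : List (Int × Int)) (r_lo r_hi c_lo c_hi : Int) (use_row : Bool) (m : Int) :
    pvMinOff covered r_lo r_hi c_lo c_hi use_row = some m ↔
      ((∃ rc ∈ covered, (r_lo ≤ rc.1 ∧ rc.1 < r_hi ∧ c_lo ≤ rc.2 ∧ rc.2 < c_hi) ∧
          (if use_row then rc.1 - r_lo else rc.2 - c_lo) = m) ∧
        ∀ rc ∈ covered, (r_lo ≤ rc.1 ∧ rc.1 < r_hi ∧ c_lo ≤ rc.2 ∧ rc.2 < c_hi) →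
          m ≤ (if use_row then rc.1 - r_lo else rc.2 - c_lo)) := by
  rw [pvMinOff_eq_min?, List.min?_eq_some_iff]
  simp only [List.mem_map, List.mem_filter, decide_eq_true_eq]
  constructor
  · rintro ⟨⟨rc, ⟨hmem, hbox⟩, hoff⟩, hlb⟩
    exact ⟨⟨rc, hmem, hbox, hoff⟩, fun rc' h' hb' => hlb _ ⟨rc', ⟨h', hb'⟩, rfl⟩⟩
  · rintro ⟨⟨rc, hmem, hbox, hoff⟩, hlb⟩
    refine ⟨⟨rc, ⟨hmem, hbox⟩, hoff⟩, ?_⟩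
    rintro b ⟨rc', ⟨h', hb'⟩, rfl⟩
    exact hlb rc' h' hb'

-- A's conflict scan = existence of a covered cell in the rectangle.
theorem pvAconf_iff (row_idx col_idx rs cs : Int) (covered : List (Int × Int)) (num_rows num_cols : Int) :
    pvAconf row_idx col_idx rs cs covered num_rows num_cols = true ↔
      ∃ rc ∈ covered, row_idx ≤ rc.1 ∧ rc.1 < min (row_idx + rs) num_rows ∧
        col_idx ≤ rc.2 ∧ rc.2 < min (col_idx + cs) num_cols := by
  simp only [pvAconf, List.any_eq_true, PySem.List.mem_pyRange_one]
  constructor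
  · rintro ⟨r, ⟨hr1, hr2⟩, c, ⟨hc1, hc2⟩, hmem⟩
    exact ⟨(r, c), by simpa using hmem, hr1, hr2, hc1, hc2⟩
  · rintro ⟨⟨r, c⟩, hmem, h1, h2, h3, h4⟩
    exact ⟨r, ⟨h1, h2⟩, c, ⟨h3, h4⟩, by simpa using hmem⟩

theorem shrinkCol_eq (ri ci rs : Int) (cov : List (Int × Int)) (nr nc : Int) (m : Int)
    (hm : 0 ≤ m)
    (hconf : ∀ c : Int, pvAconf ri ci rs c cov nr nc = true ↔ m < c) :
    ∀ c : Int, pvAshrinkCol ri ci rs cov nr nc c = if c ≤ m then c else max 1 m := by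
  suffices h : ∀ n : ℕ, ∀ c : Int, c.toNat ≤ n → pvAshrinkCol ri ci rs cov nr nc c = if c ≤ m then c else max 1 m by
    intro c; exact h c.toNat c le_rfl
  intro n
  induction n with
  | zero =>
    intro c hc
    rw [pvAshrinkCol, dif_neg (by omega : ¬ c > 1), if_pos (by omega : c ≤ m)]
  | succ n ih =>
    intro c hc
    rw [pvAshrinkCol]
    by_cases h1 : c > 1
    · rw [dif_pos h1]
      by_cases h2 : m < c
      · rw [if_pos ((hconf c).mpr h2), ih (c - 1) (by omega)]
        split_ifs <;> omega
      · rw [if_neg (by rw [hconf]; omega), if_pos (by omega)]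
    · rw [dif_neg h1]
      split_ifs with h2
      · rfl
      · omega

theorem shrinkRow_eq (ri ci ncsp : Int) (cov : List (Int × Int)) (nr nc : Int) (k : Int)
    (hk : 0 ≤ k)
    (hconf : ∀ r : Int, pvAconf ri ci r ncsp cov nr nc = true ↔ k < r) :
    ∀ r : Int, pvAshrinkRow ri ci ncsp cov nr nc r = if r ≤ k then r else max 1 k := by
  suffices h : ∀ n : ℕ, ∀ r : Int, r.toNat ≤ n → pvAshrinkRow ri ci ncsp cov nr nc r = if r ≤ k then r else max 1 k by
    intro r; exact h r.toNat r le_rfl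
  intro n
  induction n with
  | zero =>
    intro r hr
    rw [pvAshrinkRow, dif_neg (by omega : ¬ r > 1), if_pos (by omega : r ≤ k)]
  | succ n ih =>
    intro r hr
    rw [pvAshrinkRow]
    by_cases h1 : r > 1
    · rw [dif_pos h1]
      by_cases h2 : k < r
      · rw [if_pos ((hconf r).mpr h2), ih (r - 1) (by omega)]
        split_ifs <;> omega
      · rw [if_neg (by rw [hconf]; omega), if_pos (by omega)]
    · rw [dif_neg h1]
      split_ifs with h2
      · rfl
      · omega

theorem main_eq (ri ci rs cs : Int) (cov : List (Int × Int)) (nr nc : Int) :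
    adjust_for_conflicts_py ri ci rs cs cov nr nc = adjust_for_conflicts_py_alt ri ci rs cs cov nr nc := by
  cases hmin : pvMinOff cov ri (min (ri + rs) nr) ci nc false with
  | none =>
    have hempty := (pvMinOff_none_iff cov ri (min (ri + rs) nr) ci nc false).mp hmin
    have hcf : pvAconf ri ci rs cs cov nr nc = false := by
      rw [← Bool.not_eq_true, pvAconf_iff]
      rintro ⟨rc, hmem, h1, h2, h3, h4⟩
      exact hempty rc hmem ⟨h1, h2, h3, lt_of_lt_of_le h4 (min_le_right _ _)⟩
    simp [adjust_for_conflicts_py, adjust_for_conflicts_py_alt, hcf, hmin]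
  | some m =>
    obtain ⟨⟨rc0, hrc0, hbox0, hoff0⟩, hlb⟩ :=
      (pvMinOff_some_iff cov ri (min (ri + rs) nr) ci nc false m).mp hmin
    simp at hoff0
    have hm0 : 0 ≤ m := by omega
    have hconf : ∀ c : Int, pvAconf ri ci rs c cov nr nc = true ↔ m < c := by
      intro c
      rw [pvAconf_iff]
      constructor
      · rintro ⟨rc, hmem, h1, h2, h3, h4⟩
        have hmle := hlb rc hmem ⟨h1, h2, h3, lt_of_lt_of_le h4 (min_le_right _ _)⟩
        simp at hmle
        omega
      · intro hmc
        exact ⟨rc0, hrc0, hbox0.1, hbox0.2.1, hbox0.2.2.1, by omega⟩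
    by_cases hge : m ≥ cs
    · have hcf : pvAconf ri ci rs cs cov nr nc = false := by
        rw [← Bool.not_eq_true, hconf]; omega
      simp [adjust_for_conflicts_py, adjust_for_conflicts_py_alt, hcf, hmin, hge]
    · -- conflict: m < cs
      have hmcs : m < cs := by omega
      have hct : pvAconf ri ci rs cs cov nr nc = true := (hconf cs).mpr hmcs
      have hrs1 : 1 ≤ rs := by
        obtain ⟨rc, _, h1, h2, _, _⟩ := (pvAconf_iff ri ci rs cs cov nr nc).mp hct
        omega
      have hshC : pvAshrinkCol ri ci rs cov nr nc cs = max 1 m := by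
        rw [shrinkCol_eq ri ci rs cov nr nc m hm0 hconf cs, if_neg (by omega)]
      cases hrmin : pvMinOff cov ri nr ci (min (ci + max 1 m) nc) true with
      | none =>
        have hemptyR := (pvMinOff_none_iff cov ri nr ci (min (ci + max 1 m) nc) true).mp hrmin
        have hcfR : pvAconf ri ci rs (max 1 m) cov nr nc = false := by
          rw [← Bool.not_eq_true, pvAconf_iff]
          rintro ⟨rc, hmem, h1, h2, h3, h4⟩
          exact hemptyR rc hmem ⟨h1, lt_of_lt_of_le h2 (min_le_right _ _), h3, h4⟩
        have hshR : pvAshrinkRow ri ci (max 1 m) cov nr nc rs = rs := by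
          rw [pvAshrinkRow]
          by_cases h1 : rs > 1
          · rw [dif_pos h1, if_neg (by rw [hcfR]; simp)]
          · rw [dif_neg h1]
        have hA : adjust_for_conflicts_py ri ci rs cs cov nr nc = (max 1 rs, max 1 (max 1 m)) := by
          simp [adjust_for_conflicts_py, hct, hshC, hshR]
        have hB : adjust_for_conflicts_py_alt ri ci rs cs cov nr nc = (rs, max 1 m) := by
          simp [adjust_for_conflicts_py_alt, hmin, hrmin, hge]
        rw [hA, hB, Prod.mk.injEq]
        constructor <;> omega
      | some k =>
        obtain ⟨⟨rc1, hrc1, hbox1, hoff1⟩, hlbR⟩ :=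
          (pvMinOff_some_iff cov ri nr ci (min (ci + max 1 m) nc) true k).mp hrmin
        simp at hoff1
        have hk0 : 0 ≤ k := by omega
        have hconfR : ∀ r : Int, pvAconf ri ci r (max 1 m) cov nr nc = true ↔ k < r := by
          intro r
          rw [pvAconf_iff]
          constructor
          · rintro ⟨rc, hmem, h1, h2, h3, h4⟩
            have hkle := hlbR rc hmem ⟨h1, lt_of_lt_of_le h2 (min_le_right _ _), h3, h4⟩
            simp at hkle
            omega
          · intro hkr
            exact ⟨rc1, hrc1, hbox1.1, by omega, hbox1.2.2.1, hbox1.2.2.2⟩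
        have hshR := shrinkRow_eq ri ci (max 1 m) cov nr nc k hk0 hconfR rs
        by_cases hkr : rs ≤ k
        · have hA : adjust_for_conflicts_py ri ci rs cs cov nr nc = (max 1 rs, max 1 (max 1 m)) := by
            simp [adjust_for_conflicts_py, hct, hshC, hshR, hkr]
          have hB : adjust_for_conflicts_py_alt ri ci rs cs cov nr nc = (rs, max 1 m) := by
            simp [adjust_for_conflicts_py_alt, hmin, hrmin, hge, hkr]
          rw [hA, hB, Prod.mk.injEq]
          constructor <;> omega
        · have hA : adjust_for_conflicts_py ri ci rs cs cov nr nc = (max 1 (max 1 k), max 1 (max 1 m)) := by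
            simp [adjust_for_conflicts_py, hct, hshC, hshR, hkr]
          have hB : adjust_for_conflicts_py_alt ri ci rs cs cov nr nc = (max 1 (min rs k), max 1 m) := by
            simp [adjust_for_conflicts_py_alt, hmin, hrmin, hge, hkr]
          rw [hA, hB, Prod.mk.injEq]
          constructor <;> omega

-- ===== VERDICT (by name: the statement is the Claim_ definition above) =====
theorem adjust_for_conflicts_py_spec : Claim_equal_adjust_for_conflicts_py := by
  intro ri ci rs cs cov nr nc _
  exact main_eq ri ci rs cs cov nr nc
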